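-- pv_equiv track=rewrite | github.com/ToshikiShimizu/AtCoder | ABC/116/d.py | search_del
-- ===== SOURCE A (Python) =====
-- def search_del(mat):
--     idx = -1
--     st = set()
--     for i,(t,d) in enumerate(mat):
--         if t in st:
--             idx = i
--         st.add(t)
--     return idx
-- ===== SOURCE B (Python) =====
-- def search_del(mat):
--     # Build the first-occurrence index of each key in one forward pass,
--     # then scan from the end and return the first index whose key occurred earlier.
--     first = {}
--     for i, (t, d) in enumerate(mat):
--         if t not in first:
--             first[t] = i
--     for i, (t, d) in reversed(list(enumerate(mat))):
--         if first[t] < i: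
--             return i
--     return -1
-- ===== Notes on version B (the rewrite author's own statement) =====
-- stated objective: alternative
-- what changed: Replaces the single forward set-tracking pass with a first-occurrence index table built once plus a reverse short-circuiting scan that returns at the first (i.e. largest) index whose key occurred earlier.
import Mathlib
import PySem

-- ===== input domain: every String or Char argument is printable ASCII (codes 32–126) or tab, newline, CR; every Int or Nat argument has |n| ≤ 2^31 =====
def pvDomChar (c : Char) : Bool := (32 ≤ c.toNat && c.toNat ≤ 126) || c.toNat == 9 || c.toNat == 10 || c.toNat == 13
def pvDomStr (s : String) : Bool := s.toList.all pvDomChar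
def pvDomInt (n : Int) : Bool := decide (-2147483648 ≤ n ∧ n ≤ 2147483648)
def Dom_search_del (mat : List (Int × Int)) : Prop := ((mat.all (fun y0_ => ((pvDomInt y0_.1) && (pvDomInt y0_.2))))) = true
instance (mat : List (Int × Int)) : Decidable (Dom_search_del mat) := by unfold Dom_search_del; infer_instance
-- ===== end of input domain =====

-- B replaces A's forward set-tracking pass by a first-occurrence index table plus a
-- reverse short-circuiting scan; same result, a genuinely different traversal (objective: alternative).


-- ===== PORT A =====
-- loop body: 'if t in st: idx = i' then 'st.add(t)', state (idx, st)
def stepA (s : Int × PySem.Set Int) (p : Int × (Int × Int)) : Int × PySem.Set Int :=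
  (if PySem.Set.contains s.2 p.2.1 then p.1 else s.1, PySem.Set.add s.2 p.2.1)

def search_del (mat : List (Int × Int)) : Int :=
  ((PySem.List.enumerate mat).foldl stepA (-1, PySem.Set.empty)).1

-- ===== PORT B =====
-- first pass: 'if t not in first: first[t] = i'
def stepFirst (d : PySem.Dict Int Int) (p : Int × (Int × Int)) : PySem.Dict Int Int :=
  if d.contains p.2.1 then d else d.insert p.2.1 p.1

def firstDict (mat : List (Int × Int)) : PySem.Dict Int Int :=
  (PySem.List.enumerate mat).foldl stepFirst PySem.Dict.empty

-- second pass test 'first[t] < i'.  Python reads first[t]; every key of mat is in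
-- firstDict, so getD's default p.1 (which makes the test false) is never reached.
def bPred (first : PySem.Dict Int Int) (p : Int × (Int × Int)) : Bool :=
  decide (first.getD p.2.1 p.1 < p.1)

-- reverse scan with early return ('for … in reversed(list(enumerate(mat)))')
def search_del_alt (mat : List (Int × Int)) : Int :=
  match (PySem.List.enumerate mat).reverse.find? (bPred (firstDict mat)) with
  | some p => p.1
  | none => -1

-- ===== PRECONDITION & SPEC =====
def Spec_search_del (mat : List (Int × Int)) (out : Int) : Prop := out = search_del_alt mat
instance (mat : List (Int × Int)) (out : Int) : Decidable (Spec_search_del mat out) := by unfold Spec_search_del; infer_instance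

-- ===== CLAIM (what is proved, stated in full; the proofs are below) =====
def Claim_equal_search_del : Prop := ∀ (mat : List (Int × Int)), Dom_search_del mat → Spec_search_del mat (search_del mat)

-- ===== LEMMAS AND PROOFS =====

theorem find?_congr_mem {α : Type} {l : List α} {p q : α → Bool}
    (h : ∀ x ∈ l, p x = q x) : l.find? p = l.find? q := by
  induction l with
  | nil => rfl
  | cons a t ih =>
    simp only [List.find?_cons, h a (List.mem_cons_self)]
    cases q a <;> simp [ih (fun x hx => h x (List.mem_cons_of_mem _ hx))]

-- the set component of A's fold is the set of all keys seen so far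
theorem a_fold_snd (l : List (Int × (Int × Int))) (s : Int × PySem.Set Int) :
    (l.foldl stepA s).2 = (l.map (fun p => p.2.1)).foldl PySem.Set.add s.2 := by
  induction l generalizing s with
  | nil => rfl
  | cons a t ih => simp only [List.foldl_cons, List.map_cons]; exact ih _

theorem firstDict_append (xs : List (Int × Int)) (x : Int × Int) :
    firstDict (xs ++ [x]) =
      if (firstDict xs).contains x.1 then firstDict xs
      else (firstDict xs).insert x.1 (xs.length : Int) := by
  simp [firstDict, PySem.List.enumerate_append, PySem.List.enumerate_cons,
    PySem.List.enumerate_nil, List.foldl_append, stepFirst]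

-- firstDict's keys are exactly mat's keys
theorem contains_firstDict (mat : List (Int × Int)) : ∀ (t : Int),
    (firstDict mat).contains t = true ↔ t ∈ mat.map Prod.fst := by
  induction mat using List.reverseRecOn with
  | nil => intro t; simp [firstDict, PySem.List.enumerate_nil, pysem]
  | append_singleton xs x ih =>
    intro t
    rw [firstDict_append]
    by_cases hc : (firstDict xs).contains x.1 = true
    · have hx := (ih x.1).mp hc
      rw [if_pos hc]
      simp only [List.map_append, List.map_cons, List.map_nil, List.mem_append,
        List.mem_singleton, ih t]
      constructor
      · exact Or.inl
      · rintro (h | rfl)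
        · exact h
        · exact hx
    · rw [if_neg hc]
      simp only [List.map_append, List.map_cons, List.map_nil, List.mem_append,
        List.mem_singleton]
      rw [← ih t]
      simp [pysem]
      tauto

-- every stored first-occurrence index is below mat's length
theorem values_firstDict_lt (mat : List (Int × Int)) (t v : Int) :
    (firstDict mat).get? t = some v → v < (mat.length : Int) := by
  induction mat using List.reverseRecOn with
  | nil => intro h; simp [firstDict, PySem.List.enumerate_nil, pysem] at h
  | append_singleton xs x ih =>
    rw [firstDict_append]
    intro h
    have hlen : (((xs ++ [x]).length : Nat) : Int) = (xs.length : Int) + 1 := by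
      simp
    rw [hlen]
    by_cases hc : (firstDict xs).contains x.1 = true
    · rw [if_pos hc] at h
      have := ih h; omega
    · rw [if_neg hc] at h
      by_cases ht : t = x.1
      · subst ht
        rw [PySem.Dict.get?_insert_self] at h
        have : v = (xs.length : Int) := by injection h; omega
        omega
      · rw [PySem.Dict.get?_insert_of_ne _ _ ht] at h
        have := ih h; omega

theorem search_del_eq_alt (mat : List (Int × Int)) : search_del mat = search_del_alt mat := by
  induction mat using List.reverseRecOn with
  | nil => rfl
  | append_singleton xs x ih =>
    have henum : PySem.List.enumerate (xs ++ [x]) =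
        PySem.List.enumerate xs ++ [((xs.length : Int), x)] := by
      simp [PySem.List.enumerate_append, PySem.List.enumerate_cons, PySem.List.enumerate_nil]
    -- A side: the new element only matters if its key was already seen
    have hA : search_del (xs ++ [x]) =
        if x.1 ∈ xs.map Prod.fst then (xs.length : Int) else search_del xs := by
      unfold search_del
      rw [henum, List.foldl_append, List.foldl_cons, List.foldl_nil]
      have hst : ((PySem.List.enumerate xs).foldl stepA (-1, PySem.Set.empty)).2
          = PySem.Set.ofList (xs.map Prod.fst) := by
        rw [a_fold_snd, PySem.Set.ofList_eq_foldl]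
        congr 1
        have h2 := PySem.List.map_snd_enumerate xs (0 : Int)
        calc (PySem.List.enumerate xs).map (fun p => p.2.1)
            = ((PySem.List.enumerate xs).map (fun x => x.2)).map Prod.fst := by
              rw [List.map_map]; rfl
          _ = xs.map Prod.fst := by rw [h2]
      simp only [stepA, hst]
      by_cases hm : x.1 ∈ xs.map Prod.fst <;>
        simp [pysem, hm]
    -- B side: reverse scan looks at the new element first
    have hB : search_del_alt (xs ++ [x]) =
        if x.1 ∈ xs.map Prod.fst then (xs.length : Int) else search_del_alt xs := by
      unfold search_del_alt
      rw [henum, List.reverse_append, List.reverse_singleton, List.singleton_append]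
      by_cases hm : x.1 ∈ xs.map Prod.fst
      · have hc : (firstDict xs).contains x.1 = true := (contains_firstDict xs x.1).mpr hm
        have hfd : firstDict (xs ++ [x]) = firstDict xs := by
          rw [firstDict_append, if_pos hc]
        obtain ⟨v, hv⟩ : ∃ v, (firstDict xs).get? x.1 = some v := by
          rw [PySem.Dict.contains_eq_isSome_get?] at hc
          exact Option.isSome_iff_exists.mp hc
        have hvlt := values_firstDict_lt xs x.1 v hv
        have hpred : bPred (firstDict (xs ++ [x])) ((xs.length : Int), x) = true := by
          simp only [bPred, hfd, PySem.Dict.getD_eq_get?_getD, hv, Option.getD_some,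
            decide_eq_true_eq]
          exact hvlt
        rw [List.find?_cons_of_pos hpred, if_pos hm]
      · have hc : (firstDict xs).contains x.1 = false := by
          rw [Bool.eq_false_iff]
          intro h
          exact hm ((contains_firstDict xs x.1).mp h)
        have hfd : firstDict (xs ++ [x]) = (firstDict xs).insert x.1 (xs.length : Int) := by
          rw [firstDict_append, if_neg (by simp [hc])]
        have hpred : bPred (firstDict (xs ++ [x])) ((xs.length : Int), x) = false := by
          simp [bPred, hfd, PySem.Dict.getD_eq_get?_getD, PySem.Dict.get?_insert_self]
        rw [List.find?_cons_of_neg (by simp [hpred]), if_neg hm]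
        have hcong : (PySem.List.enumerate xs).reverse.find? (bPred (firstDict (xs ++ [x])))
            = (PySem.List.enumerate xs).reverse.find? (bPred (firstDict xs)) := by
          apply find?_congr_mem
          intro p hp
          rw [List.mem_reverse] at hp
          obtain ⟨k, hk, rfl⟩ := (PySem.List.mem_enumerate_iff _ _ _).mp hp
          have hne : (xs[k]).1 ≠ x.1 := by
            intro he
            exact hm (he ▸ List.mem_map_of_mem (xs.getElem_mem hk))
          simp [bPred, hfd, PySem.Dict.getD_eq_get?_getD,
            PySem.Dict.get?_insert_of_ne _ _ hne]
        rw [hcong]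
    rw [hA, hB]
    by_cases hm : x.1 ∈ xs.map Prod.fst <;> simp [hm, ih]

-- ===== VERDICT (by name: the statement is the Claim_ definition above) =====
theorem search_del_spec : Claim_equal_search_del := by
  intro mat _
  unfold Spec_search_del
  exact search_del_eq_alt mat
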